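-- pv_equiv track=rewrite | github.com/ilialobjanidze/GOA-homework | level 028/homework/homeworkd.py | pair_zeros
-- ===== SOURCE A (Python) =====
-- def pair_zeros(digits):
--     result = []
--     zero_count = 0
--
--     for digit in digits:
--         if digit == 0:
--             zero_count += 1
--         else:
--             if zero_count % 2 == 1:
--                 result.append(0)
--             result.append(digit)
--             zero_count = 0
--
--     if zero_count % 2 == 1:
--         result.append(0)
--
--     return result
-- ===== SOURCE B (Python) =====
-- def pair_zeros(digits):
--     out = []
--     i = 0
--     n = len(digits)
--     while i < n:
--         if digits[i] == 0 and i + 1 < n and digits[i + 1] == 0: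
--             i += 2  # an adjacent pair of zeros cancels and emits nothing
--         else:
--             out.append(digits[i])
--             i += 1
--     return out
-- ===== Notes on version B (the rewrite author's own statement) =====
-- stated objective: alternative
-- what changed: B greedily cancels ADJACENT zero pairs with an index cursor that jumps by 2 over each 00 pair and copies every other element, instead of A's run-counting pass that tallies a zero_count and flushes its parity at each nonzero and at the end.
import Mathlib
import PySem

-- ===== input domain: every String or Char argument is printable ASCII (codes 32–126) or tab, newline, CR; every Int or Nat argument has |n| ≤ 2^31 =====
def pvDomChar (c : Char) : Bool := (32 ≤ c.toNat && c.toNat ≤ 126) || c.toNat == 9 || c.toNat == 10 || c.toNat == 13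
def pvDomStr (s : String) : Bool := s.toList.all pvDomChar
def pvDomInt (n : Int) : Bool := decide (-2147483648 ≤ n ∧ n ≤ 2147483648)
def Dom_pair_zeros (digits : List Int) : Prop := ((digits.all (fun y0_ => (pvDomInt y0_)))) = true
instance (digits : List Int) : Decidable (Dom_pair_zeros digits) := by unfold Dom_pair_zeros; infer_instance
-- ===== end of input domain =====

-- B replaces A's run-counting pass (zero_count + parity flush) by greedy cancellation of
-- ADJACENT zero pairs: a cursor jumps by 2 over each 00 pair, every other element is copied (alternative, same cost).

-- ===== PORT A =====
-- A: one pass with state (result, zero_count); final flush of the pending parity.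
def pair_zeros (digits : List Int) : List Int :=
  let s := digits.foldl
    (fun (s : List Int × Int) digit =>
      if digit == 0 then (s.1, s.2 + 1)
      else ((s.1 ++ (if PySem.Int.mod s.2 2 == 1 then [0] else [])) ++ [digit], 0))
    ([], 0)
  s.1 ++ (if PySem.Int.mod s.2 2 == 1 then [0] else [])

-- ===== PORT B =====
-- B's while loop over the index: 'i' pointing at d :: rest; a 00 pair at the cursor is skipped
-- (i += 2), anything else is copied (i += 1).
def pzGo : List Int → List Int
  | [] => []
  | [d] => [d]
  | d :: e :: rest =>
    if d == 0 && e == 0 then pzGo rest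
    else d :: pzGo (e :: rest)

def pair_zeros_alt (digits : List Int) : List Int := pzGo digits

-- ===== PRECONDITION & SPEC =====
def Spec_pair_zeros (digits : List Int) (out : List Int) : Prop := out = pair_zeros_alt digits
instance (digits : List Int) (out : List Int) : Decidable (Spec_pair_zeros digits out) := by unfold Spec_pair_zeros; infer_instance

-- ===== CLAIM (what is proved, stated in full; the proofs are below) =====
def Claim_equal_pair_zeros : Prop := ∀ (digits : List Int), Dom_pair_zeros digits → Spec_pair_zeros digits (pair_zeros digits)

-- ===== LEMMAS AND PROOFS =====

-- the parity flush A performs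
def pvParity (zc : Int) : List Int := if PySem.Int.mod zc 2 == 1 then [0] else []

-- A restated as a structural recursion on the list with the pending zero count
def pvGoA (zc : Int) : List Int → List Int
  | [] => pvParity zc
  | d :: ds => if d == 0 then pvGoA (zc + 1) ds else pvParity zc ++ d :: pvGoA 0 ds

lemma pvGoA_nil (zc : Int) : pvGoA zc [] = pvParity zc := rfl
lemma pvGoA_cons (zc : Int) (d : Int) (ds : List Int) :
    pvGoA zc (d :: ds) = if d == 0 then pvGoA (zc + 1) ds else pvParity zc ++ d :: pvGoA 0 ds := rfl

-- A's foldl from any state equals res ++ pvGoA zc ds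
lemma pvFoldA (ds : List Int) : ∀ (res : List Int) (zc : Int),
    (let s := ds.foldl
      (fun (s : List Int × Int) digit =>
        if digit == 0 then (s.1, s.2 + 1)
        else ((s.1 ++ (if PySem.Int.mod s.2 2 == 1 then [0] else [])) ++ [digit], 0))
      (res, zc)
     s.1 ++ (if PySem.Int.mod s.2 2 == 1 then [0] else [])) = res ++ pvGoA zc ds := by
  induction ds with
  | nil => intro res zc; rfl
  | cons d ds ih =>
    intro res zc
    by_cases h : d == 0
    · simp only [List.foldl_cons, h, if_pos, pvGoA_cons]
      simpa [h] using ih res (zc + 1)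
    · simp only [List.foldl_cons, pvGoA_cons]
      have := ih ((res ++ (if PySem.Int.mod zc 2 == 1 then [0] else [])) ++ [d]) 0
      rw [show (if (d == 0) = true then (res, zc + 1)
            else ((res ++ (if PySem.Int.mod zc 2 == 1 then [0] else [])) ++ [d], 0))
          = ((res ++ (if PySem.Int.mod zc 2 == 1 then [0] else [])) ++ [d], 0) by simp [h]]
      rw [this]
      simp [h, pvParity, List.append_assoc]

-- pvGoA depends on zc only through its parity
lemma pvParity_add_two (zc : Int) : pvParity (zc + 2) = pvParity zc := by
  simp only [pvParity]
  have : PySem.Int.mod (zc + 2) 2 = PySem.Int.mod zc 2 := by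
    rw [PySem.Int.mod_eq_emod_of_pos (by norm_num), PySem.Int.mod_eq_emod_of_pos (by norm_num)]
    omega
  rw [this]

lemma pvGoA_add_two (ds : List Int) : ∀ (zc : Int), pvGoA (zc + 2) ds = pvGoA zc ds := by
  induction ds with
  | nil => intro zc; simp [pvGoA_nil, pvParity_add_two]
  | cons d ds ih =>
    intro zc
    rw [pvGoA_cons, pvGoA_cons]
    by_cases h : d == 0
    · simp only [h, if_pos]
      have : zc + 2 + 1 = zc + 1 + 2 := by ring
      rw [this, ih]
    · simp [h, pvParity_add_two]

-- pvParity on the two literal counters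
lemma pvParity_zero : pvParity 0 = [] := rfl
lemma pvParity_one : pvParity 1 = [0] := rfl

-- main bridge: B's pair-cancelling cursor equals the counter-based recursion
lemma pzGo_eq_goA (n : Nat) : ∀ (ds : List Int), ds.length ≤ n → pzGo ds = pvGoA 0 ds := by
  induction n with
  | zero =>
    intro ds h
    rw [List.length_eq_zero_iff.mp (Nat.le_zero.mp h)]
    simp [pzGo, pvGoA_nil, pvParity_zero]
  | succ n ih =>
    intro ds hlen
    match ds with
    | [] => simp [pzGo, pvGoA_nil, pvParity_zero]
    | [d] =>
      by_cases h : d == 0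
      · have hd : d = 0 := by simpa using h
        subst hd
        simp [pzGo, pvGoA_cons, pvGoA_nil, pvParity_one]
      · simp [pzGo, pvGoA_cons, pvGoA_nil, h, pvParity_zero]
    | d :: e :: rest =>
      simp only [List.length_cons] at hlen
      by_cases hd : d == 0
      · have hd0 : d = 0 := by simpa using hd
        by_cases he : e == 0
        · have he0 : e = 0 := by simpa using he
          subst hd0; subst he0
          rw [show pzGo (0 :: 0 :: rest) = pzGo rest by simp [pzGo]]
          rw [pvGoA_cons, if_pos (by simp), pvGoA_cons, if_pos (by simp)]
          rw [show (0 : Int) + 1 + 1 = 0 + 2 by ring, pvGoA_add_two]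
          exact ih rest (by omega)
        · subst hd0
          rw [show pzGo (0 :: e :: rest) = 0 :: pzGo (e :: rest) by simp [pzGo, he]]
          rw [ih (e :: rest) (by simp only [List.length_cons]; omega)]
          simp [pvGoA_cons, he, pvParity_zero, pvParity_one]
      · rw [show pzGo (d :: e :: rest) = d :: pzGo (e :: rest) by simp [pzGo, hd]]
        rw [ih (e :: rest) (by simp only [List.length_cons]; omega)]
        simp [pvGoA_cons, hd, pvParity_zero]

-- ===== VERDICT (by name: the statement is the Claim_ definition above) =====
theorem pair_zeros_spec : Claim_equal_pair_zeros := by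
  intro digits _
  show pair_zeros digits = pair_zeros_alt digits
  unfold pair_zeros pair_zeros_alt
  rw [pvFoldA digits [] 0, List.nil_append, pzGo_eq_goA digits.length digits le_rfl]
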